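-- pv_equiv track=rewrite | github.com/Afaqz1/LeetCode-Practice | counterforfinancialtickets.py | coutnerforfinancialtickets
-- ===== SOURCE A (Python) =====
-- def coutnerforfinancialtickets(arr, k):
--     steps = 0
--
--     while arr[k] != 0:
--         arr[k] -= 1
--         steps += 1
--         for i in range(len(arr)):
--             if i != k and arr[i] > 0:
--                 arr[i] -= 1
--                 steps += 1
--
--     return steps
-- ===== SOURCE B (Python) =====
-- def coutnerforfinancialtickets(arr, k):
--     t = arr[k]
--     total = t
--     for i, v in enumerate(arr):
--         if i != k and v > 0:
--             total += min(v, t)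
--     return total
-- ===== Notes on version B (the rewrite author's own statement) =====
-- stated objective: faster
-- what changed: Replaces the simulation that drains arr[k] one step at a time (rescanning the whole list every step) by the closed form arr[k] + sum of min(arr[i], arr[k]) over the other positive entries, computed in one pass.
-- outside the precondition, e.g. on coutnerforfinancialtickets([3], -1): A returns 3, B returns 6; on coutnerforfinancialtickets([-1], 0): A does not finish within the time limit, B returns -1; on coutnerforfinancialtickets([], 0): A raises IndexError, B raises IndexError
import Mathlib
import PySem

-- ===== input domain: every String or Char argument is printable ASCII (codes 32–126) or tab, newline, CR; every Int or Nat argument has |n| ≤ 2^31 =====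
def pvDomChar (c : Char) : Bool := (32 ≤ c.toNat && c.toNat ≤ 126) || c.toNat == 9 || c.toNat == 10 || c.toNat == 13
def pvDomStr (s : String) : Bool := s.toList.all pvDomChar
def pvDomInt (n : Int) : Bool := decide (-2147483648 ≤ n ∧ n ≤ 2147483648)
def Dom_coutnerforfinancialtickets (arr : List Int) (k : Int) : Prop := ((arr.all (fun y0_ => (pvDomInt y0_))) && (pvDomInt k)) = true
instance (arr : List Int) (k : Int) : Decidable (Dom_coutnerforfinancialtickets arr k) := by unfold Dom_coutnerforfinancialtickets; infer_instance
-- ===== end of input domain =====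

-- B replaces A's step-by-step draining simulation by the one-pass closed form
-- arr[k] + Σ_{i≠k, arr[i]>0} min(arr[i], arr[k])  (O(n) instead of O(arr[k]·n)).
-- NOTE: Python A mutates arr in place (drains it); B does not. The equivalence
-- proved here is about the RETURN value only.

-- ===== PORT A =====
-- inner 'for i in range(len(arr))' loop: structural recursion over the list,
-- carrying the running index i and the steps accumulator; since iteration i only
-- reads/writes arr[i], rebuilding the list head-first is the same mutation.
def pvInnerA (k : Int) : List Int → Int → Int → List Int × Int
  | [], _, steps => ([], steps)
  | a :: rest, i, steps =>
    if i ≠ k ∧ a > 0 then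
      let r := pvInnerA k rest (i + 1) (steps + 1)
      ((a - 1) :: r.1, r.2)
    else
      let r := pvInnerA k rest (i + 1) steps
      (a :: r.1, r.2)

-- outer 'while arr[k] != 0' loop, totalised with a fuel argument; inside Pre_
-- (0 ≤ k < len, arr[k] ≥ 0) the loop runs exactly arr[k] times, so the fuel
-- chosen in the wrapper suffices and is never exhausted.
def pvLoopA (k : Int) : Nat → List Int → Int → Int
  | 0, _, steps => steps
  | fuel + 1, arr, steps =>
    match PySem.List.pyGet? arr k with
    | none => steps   -- IndexError in Python; outside Pre_
    | some v =>
      if v ≠ 0 then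
        let arr1 := arr.set k.toNat (v - 1)   -- arr[k] -= 1 (k ≥ 0 inside Pre_)
        let r := pvInnerA k arr1 0 (steps + 1)
        pvLoopA k fuel r.1 r.2
      else steps

def coutnerforfinancialtickets (arr : List Int) (k : Int) : Int :=
  pvLoopA k ((PySem.List.pyGet? arr k).getD 0).toNat arr 0

-- ===== PORT B =====
-- the 'for i, v in enumerate(arr)' accumulator loop of Source B
def pvSumB (k t : Int) : List Int → Int → Int → Int
  | [], _, total => total
  | v :: rest, i, total =>
    pvSumB k t rest (i + 1) (if i ≠ k ∧ v > 0 then total + min v t else total)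

def coutnerforfinancialtickets_alt (arr : List Int) (k : Int) : Int :=
  match PySem.List.pyGet? arr k with
  | none => 0   -- IndexError in Python; outside Pre_
  | some t => pvSumB k t arr 0 t

-- ===== PRECONDITION & SPEC =====
-- Pre_ excludes: (a) k out of range, where A raises IndexError; (b) arr[k] < 0,
-- where A loops forever; (c) negative in-range k, where A RETURNS a value but the
-- inner guard 'i != k' never matches the wrapped index, so A accidentally drains
-- arr[k] twice per step — an artefact of the index comparison, and B's reading
-- (arr[k] is not one of the 'other' entries) is as defensible as A's.
def Pre_coutnerforfinancialtickets (arr : List Int) (k : Int) : Prop :=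
  0 ≤ k ∧ k.toNat < arr.length ∧ 0 ≤ arr.getD k.toNat 0
instance (arr : List Int) (k : Int) : Decidable (Pre_coutnerforfinancialtickets arr k) := by
  unfold Pre_coutnerforfinancialtickets; infer_instance
def pvWitness_coutnerforfinancialtickets : List Int × Int := ([2, 3, 1], 1)
def Spec_coutnerforfinancialtickets (arr : List Int) (k : Int) (out : Int) : Prop := out = coutnerforfinancialtickets_alt arr k
instance (arr : List Int) (k : Int) (out : Int) : Decidable (Spec_coutnerforfinancialtickets arr k out) := by unfold Spec_coutnerforfinancialtickets; infer_instance

-- ===== CLAIM (what is proved, stated in full; the proofs are below) =====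
def Claim_equal_coutnerforfinancialtickets : Prop := ∀ (arr : List Int) (k : Int), Dom_coutnerforfinancialtickets arr k → Pre_coutnerforfinancialtickets arr k → Spec_coutnerforfinancialtickets arr k (coutnerforfinancialtickets arr k)

-- ===== LEMMAS AND PROOFS =====

-- spec helpers (proof-only): the effect of one inner pass, and the pure sum
def pvDec (k : Int) : Int → List Int → List Int
  | _, [] => []
  | i, a :: l => (if i ≠ k ∧ a > 0 then a - 1 else a) :: pvDec k (i + 1) l

def pvCnt (k : Int) : Int → List Int → Int
  | _, [] => 0
  | i, a :: l => (if i ≠ k ∧ a > 0 then 1 else 0) + pvCnt k (i + 1) l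

def pvS (k v : Int) : Int → List Int → Int
  | _, [] => 0
  | i, a :: l => (if i ≠ k ∧ a > 0 then min a v else 0) + pvS k v (i + 1) l

theorem pvInnerA_spec (k : Int) : ∀ (l : List Int) (i steps : Int),
    pvInnerA k l i steps = (pvDec k i l, steps + pvCnt k i l)
  | [], i, steps => by simp [pvInnerA, pvDec, pvCnt]
  | a :: l, i, steps => by
    simp only [pvInnerA, pvDec, pvCnt]
    by_cases h : i ≠ k ∧ a > 0 <;>
      simp [h, pvInnerA_spec k l (i + 1)] <;> ring

theorem pvSumB_spec (k t : Int) : ∀ (l : List Int) (i total : Int),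
    pvSumB k t l i total = total + pvS k t i l
  | [], i, total => by simp [pvSumB, pvS]
  | v :: l, i, total => by
    simp only [pvSumB, pvS]
    by_cases h : i ≠ k ∧ v > 0 <;>
      simp [h, pvSumB_spec k t l (i + 1)] <;> ring

theorem pvS_zero (k : Int) : ∀ (i : Int) (l : List Int), pvS k 0 i l = 0
  | i, [] => by simp [pvS]
  | i, a :: l => by
    simp only [pvS, pvS_zero k (i + 1) l]
    by_cases h : i ≠ k ∧ a > 0
    · have : min a (0 : Int) = 0 := by omega
      simp [h, this]
    · simp [h]

theorem pvS_key (k v : Int) (hv : 1 ≤ v) : ∀ (i : Int) (l : List Int),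
    pvS k v i l = pvCnt k i l + pvS k (v - 1) i (pvDec k i l)
  | i, [] => by simp [pvS, pvCnt, pvDec]
  | i, a :: l => by
    simp only [pvS, pvCnt, pvDec]
    by_cases h : i ≠ k ∧ a > 0
    · by_cases h2 : a - 1 > 0
      · have : i ≠ k ∧ a - 1 > 0 := ⟨h.1, h2⟩
        simp only [if_pos h, if_pos this, pvS_key k v hv (i + 1) l]
        have : min a v = 1 + min (a - 1) (v - 1) := by omega
        omega
      · have : ¬ (i ≠ k ∧ a - 1 > 0) := by
          intro hc; exact h2 hc.2
        simp only [if_pos h, if_neg this, pvS_key k v hv (i + 1) l]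
        have : min a v = 1 := by omega
        omega
    · simp only [if_neg h, pvS_key k v hv (i + 1) l]
      omega

theorem pvDec_length (k : Int) : ∀ (i : Int) (l : List Int),
    (pvDec k i l).length = l.length
  | i, [] => by simp [pvDec]
  | i, a :: l => by simp [pvDec, pvDec_length k (i + 1) l]

theorem pvDec_getD (k : Int) : ∀ (i : Int) (l : List Int) (j : Nat) (d : Int),
    i + j = k → (pvDec k i l).getD j d = l.getD j d
  | i, [], j, d, _ => by simp [pvDec]
  | i, a :: l, 0, d, hij => by
    have : ¬ (i ≠ k ∧ a > 0) := by
      intro hc; exact hc.1 (by omega)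
    simp [pvDec, this]
  | i, a :: l, j + 1, d, hij => by
    have h := pvDec_getD k (i + 1) l j d (by push_cast at hij ⊢; omega)
    simp only [pvDec, List.getD_cons_succ]
    exact h

theorem pvS_set (k v x : Int) : ∀ (i : Int) (l : List Int) (j : Nat),
    i + j = k → pvS k v i (l.set j x) = pvS k v i l
  | i, [], j, _ => by simp
  | i, a :: l, 0, hij => by
    have : ¬ (i ≠ k ∧ a > 0) := fun hc => hc.1 (by omega)
    have hx : ¬ (i ≠ k ∧ x > 0) := fun hc => hc.1 (by omega)
    simp [pvS, this, hx]
  | i, a :: l, j + 1, hij => by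
    have := pvS_set k v x (i + 1) l j (by push_cast at hij ⊢; omega)
    simp [pvS, this]

theorem getD_set_self (l : List Int) (j : Nat) (x d : Int) (h : j < l.length) :
    (l.set j x).getD j d = x := by
  simp [List.getD_eq_getElem?_getD, List.getElem?_set_self, h]

theorem pyGet?_pre (arr : List Int) (k : Int) (h0 : 0 ≤ k) (hl : k.toNat < arr.length) :
    PySem.List.pyGet? arr k = some (arr.getD k.toNat 0) := by
  rw [PySem.List.pyGet?_of_nonneg arr h0]
  simp [List.getD_eq_getElem?_getD, List.getElem?_eq_getElem hl]

theorem pvLoopA_closed (k : Int) (h0 : 0 ≤ k) : ∀ (n : Nat) (arr : List Int) (steps : Int)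
    (fuel : Nat), k.toNat < arr.length → arr.getD k.toNat 0 = (n : Int) → n ≤ fuel →
    pvLoopA k fuel arr steps = steps + n + pvS k n 0 arr
  | 0, arr, steps, fuel, hl, hv, hf => by
    cases fuel with
    | zero => simp [pvLoopA, pvS_zero]
    | succ f =>
      rw [pvLoopA, pyGet?_pre arr k h0 hl, hv]
      simp [pvS_zero]
  | n + 1, arr, steps, fuel, hl, hv, hf => by
    cases fuel with
    | zero => omega
    | succ f =>
      rw [pvLoopA, pyGet?_pre arr k h0 hl, hv]
      have hne : ((n : Int) + 1 ≠ 0) := by push_cast; omega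
      simp only [Nat.cast_add, Nat.cast_one, if_pos hne, pvInnerA_spec]
      set arr1 := arr.set k.toNat ((n : Int) + 1 - 1) with harr1
      have hl1 : k.toNat < arr1.length := by simp [harr1]; omega
      have hv1 : arr1.getD k.toNat 0 = (n : Int) := by
        rw [harr1, getD_set_self _ _ _ _ hl]; ring
      set arr2 := pvDec k 0 arr1 with harr2
      have hl2 : k.toNat < arr2.length := by rw [harr2, pvDec_length]; exact hl1
      have hv2 : arr2.getD k.toNat 0 = (n : Int) := by
        rw [harr2, pvDec_getD k 0 arr1 k.toNat 0 (by omega)]; exact hv1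
      rw [pvLoopA_closed k h0 n arr2 (steps + 1 + pvCnt k 0 arr1) f hl2 hv2 (by omega)]
      have hkey : pvS k ((n : Int) + 1) 0 arr1 = pvCnt k 0 arr1 + pvS k ((n : Int) + 1 - 1) 0 (pvDec k 0 arr1) := by
        exact pvS_key k ((n : Int) + 1) (by omega) 0 arr1
      have hset : pvS k ((n : Int) + 1) 0 arr1 = pvS k ((n : Int) + 1) 0 arr := by
        rw [harr1]; exact pvS_set k ((n : Int) + 1) _ 0 arr k.toNat (by omega)
      have : ((n : Int) + 1 - 1) = (n : Int) := by ring
      rw [this] at hkey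
      rw [← harr2] at hkey
      omega

-- ===== VERDICT (by name: the statement is the Claim_ definition above) =====
theorem coutnerforfinancialtickets_spec : Claim_equal_coutnerforfinancialtickets := by
  intro arr k _ hpre
  obtain ⟨h0, hl, hv⟩ := hpre
  unfold Spec_coutnerforfinancialtickets coutnerforfinancialtickets coutnerforfinancialtickets_alt
  rw [pyGet?_pre arr k h0 hl]
  set v := arr.getD k.toNat 0 with hvdef
  have hcast : ((v.toNat : Nat) : Int) = v := Int.toNat_of_nonneg hv
  show pvLoopA k ((some v).getD 0).toNat arr 0 = pvSumB k v arr 0 v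
  simp only [Option.getD_some]
  rw [pvLoopA_closed k h0 v.toNat arr 0 v.toNat hl (by rw [hcast]) le_rfl]
  rw [pvSumB_spec]
  simp [hcast]
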